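-- pv_equiv track=rewrite | github.com/netnutmike/homeassistant-meshtastic | custom_components/meshtastic/aiomeshtastic/connection/decoder.py | extract_channel_from_topic
-- ===== SOURCE A (Python) =====
-- _TYPE_INDICATORS = {"e", "c", "json"}
--
-- def extract_channel_from_topic(topic: str) -> str:
--     """Extract the channel name from an MQTT topic string.
--
--     Locates the protocol version ``2`` followed by a type indicator
--     (``e``, ``c``, or ``json``) and returns the next segment as the
--     channel name.
--
--     Supports standard format: msh/{region}/2/e/{channel}
--     Extended format: msh/{region}/{area}/{network}/2/e/{channel}
--     JSON format: msh/{region}/2/json/{channel}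
--
--     Args:
--         topic: The MQTT topic string.
--
--     Returns:
--         The extracted channel name, or "unknown" if not found.
--     """
--     parts = topic.split("/")
--     for i, part in enumerate(parts):
--         if (
--             part in _TYPE_INDICATORS
--             and i >= 1
--             and parts[i - 1] == "2"
--             and i + 1 < len(parts)
--         ):
--             return parts[i + 1]
--     return "unknown"
-- ===== SOURCE B (Python) =====
-- def extract_channel_from_topic(topic: str) -> str:
--     s = "/" + topic
--     best, plen = -1, 0
--     for pat in ("/2/e/", "/2/c/", "/2/json/"):
--         j = s.find(pat)
--         if j != -1 and (best == -1 or j < best):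
--             best, plen = j, len(pat)
--     if best == -1:
--         return "unknown"
--     rest = s[best + plen:]
--     k = rest.find("/")
--     return rest if k == -1 else rest[:k]
-- ===== Notes on version B (the rewrite author's own statement) =====
-- stated objective: alternative
-- what changed: B never splits the topic: it searches the raw string '/'+topic with str.find for the leftmost occurrence of one of the three literal patterns '/2/e/', '/2/c/', '/2/json/' and slices out the segment that follows, instead of A's split('/') plus an index-guarded scan over the parts.
import Mathlib
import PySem

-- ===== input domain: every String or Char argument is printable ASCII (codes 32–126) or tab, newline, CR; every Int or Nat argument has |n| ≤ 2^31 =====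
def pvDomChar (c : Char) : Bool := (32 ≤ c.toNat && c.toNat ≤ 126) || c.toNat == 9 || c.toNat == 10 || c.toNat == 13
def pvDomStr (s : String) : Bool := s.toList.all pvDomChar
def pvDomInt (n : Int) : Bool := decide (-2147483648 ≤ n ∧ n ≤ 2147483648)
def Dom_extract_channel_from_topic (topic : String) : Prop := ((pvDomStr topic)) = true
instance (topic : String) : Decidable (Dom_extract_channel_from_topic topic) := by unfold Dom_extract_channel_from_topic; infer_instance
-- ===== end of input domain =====

-- B drops the split-and-scan entirely: it searches the raw topic (with a '/' prepended) for the
-- leftmost occurrence of one of the literal patterns "/2/e/", "/2/c/", "/2/json/" via str.find and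
-- slices out the following segment (alternative algorithm; same cost).


-- ===== PORT A =====
-- _TYPE_INDICATORS = {"e", "c", "json"}
def pvIndicators : PySem.Set String := PySem.Set.ofList ["e", "c", "json"]

-- the `for i, part in enumerate(parts)` loop with its early return
def pvLoopA (parts : List String) : List (Int × String) → String
  | [] => "unknown"
  | (i, part) :: rest =>
    if part ∈ pvIndicators ∧ 1 ≤ i ∧ PySem.List.pyGet? parts (i - 1) = some "2" ∧
        i + 1 < (parts.length : Int) then
      (PySem.List.pyGet? parts (i + 1)).getD ""   -- guard guarantees in range
    else pvLoopA parts rest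

def extract_channel_from_topic (topic : String) : String :=
  let parts := (PySem.Str.split? topic "/").getD []   -- sep "/" is nonempty, so split? is always some
  pvLoopA parts (PySem.List.enumerate parts 0)

-- ===== PORT B =====
-- s = "/" + topic; leftmost str.find among the three patterns, then slice out the next segment
def extract_channel_from_topic_alt (topic : String) : String :=
  let s := "/" ++ topic
  let bp := ["/2/e/", "/2/c/", "/2/json/"].foldl
    (fun (bp : Int × Int) (pat : String) =>
      let j := PySem.Str.find s pat
      if j ≠ -1 ∧ (bp.1 = -1 ∨ j < bp.1) then (j, PySem.Str.len pat) else bp)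
    (-1, 0)
  if bp.1 = -1 then "unknown"
  else
    let rest := PySem.Str.slice s (some (bp.1 + bp.2)) none
    let k := PySem.Str.find rest "/"
    if k = -1 then rest else PySem.Str.slice rest none (some k)

-- ===== PRECONDITION & SPEC =====
def Spec_extract_channel_from_topic (topic : String) (out : String) : Prop := out = extract_channel_from_topic_alt topic
instance (topic : String) (out : String) : Decidable (Spec_extract_channel_from_topic topic out) := by unfold Spec_extract_channel_from_topic; infer_instance

-- ===== CLAIM (what is proved, stated in full; the proofs are below) =====
def Claim_equal_extract_channel_from_topic : Prop := ∀ (topic : String), Dom_extract_channel_from_topic topic → Spec_extract_channel_from_topic topic (extract_channel_from_topic topic)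

-- ===== LEMMAS AND PROOFS =====

-- ---- A-side: the enumerate loop equals a sliding triple scan over the parts ----
def pvScanB : List String → String
  | a :: b :: c :: rest =>
    if a = "2" ∧ (b = "e" ∨ b = "c" ∨ b = "json") then c else pvScanB (b :: c :: rest)
  | _ => "unknown"
termination_by l => l.length
decreasing_by simp

lemma pvLoopA_drop (parts : List String) :
    ∀ n k, 1 ≤ k → parts.length - k ≤ n →
      pvLoopA parts (PySem.List.enumerate (parts.drop k) (k : Int)) =
        pvScanB (parts.drop (k - 1)) := by
  intro n
  induction n with
  | zero =>
    intro k hk hn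
    have hlen : parts.length ≤ k := by omega
    rw [List.drop_eq_nil_of_le hlen]
    rcases Nat.lt_or_ge (k - 1) parts.length with h | h
    · rw [List.drop_eq_getElem_cons h, List.drop_eq_nil_of_le (by omega)]
      simp [PySem.List.enumerate, pvLoopA, pvScanB]
    · rw [List.drop_eq_nil_of_le h]
      simp [PySem.List.enumerate, pvLoopA, pvScanB]
  | succ n ih =>
    intro k hk hn
    rcases Nat.lt_or_ge k parts.length with hklt | hkge
    · rw [List.drop_eq_getElem_cons hklt]
      rw [PySem.List.enumerate_cons]
      have hk1 : k - 1 < parts.length := by omega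
      rw [List.drop_eq_getElem_cons hk1]
      have hstep : k - 1 + 1 = k := by omega
      rw [show parts.drop (k - 1 + 1) = parts[k]'hklt :: parts.drop (k + 1) by
        rw [hstep, List.drop_eq_getElem_cons hklt]]
      have hget1 : PySem.List.pyGet? parts ((k : Int) - 1) = parts[k-1]? := by
        rw [show ((k : Int) - 1) = ((k - 1 : Nat) : Int) by omega]
        simp
      rcases Nat.lt_or_ge (k + 1) parts.length with h2 | h2
      · rw [show parts.drop (k + 1) = parts[k+1]'h2 :: parts.drop (k + 2) by
          rw [List.drop_eq_getElem_cons h2]]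
        by_cases hg : parts[k]'hklt ∈ pvIndicators ∧ parts[k-1]'hk1 = "2"
        · have hmem : parts[k]'hklt = "e" ∨ parts[k]'hklt = "c" ∨ parts[k]'hklt = "json" := by
            have := hg.1
            simpa [pvIndicators, PySem.Set.ofList, PySem.Set.mem_ofList] using this
          rw [pvLoopA, pvScanB]
          have hgetp1 : PySem.List.pyGet? parts ((k : Int) + 1) = parts[k+1]? := by
            rw [show ((k : Int) + 1) = ((k + 1 : Nat) : Int) by push_cast; ring,
                PySem.List.pyGet?_natCast]
          rw [if_pos, if_pos]
          · simp [hgetp1, List.getElem?_eq_getElem h2]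
          · exact ⟨hg.2, hmem⟩
          · refine ⟨hg.1, by exact_mod_cast hk, ?_, by exact_mod_cast h2⟩
            rw [hget1, List.getElem?_eq_getElem hk1, hg.2]
        · rw [pvLoopA, pvScanB]
          rw [if_neg, if_neg]
          · have h' := ih (k + 1) (by omega) (by omega)
            rw [show k + 1 - 1 = k by omega, List.drop_eq_getElem_cons hklt,
                List.drop_eq_getElem_cons h2] at h'
            rw [show ((k : Int) + 1) = ((k + 1 : Nat) : Int) by push_cast; ring]
            exact h'
          · rintro ⟨h2eq, hbmem⟩
            exact hg ⟨by simpa [pvIndicators, PySem.Set.ofList, PySem.Set.mem_ofList] using hbmem, h2eq⟩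
          · rintro ⟨ha, -, hb, -⟩
            rw [hget1, List.getElem?_eq_getElem hk1] at hb
            exact hg ⟨ha, by injection hb⟩
      · rw [List.drop_eq_nil_of_le h2]
        rw [pvLoopA, pvScanB]
        rw [if_neg (by rintro ⟨-, -, -, hlt⟩; omega)]
        · simp [PySem.List.enumerate, pvLoopA]
        · intro a b c r hcontra
          simp at hcontra
    · rw [List.drop_eq_nil_of_le hkge]
      rcases Nat.lt_or_ge (k - 1) parts.length with h | h
      · rw [List.drop_eq_getElem_cons h, List.drop_eq_nil_of_le (by omega)]
        simp [PySem.List.enumerate, pvLoopA, pvScanB]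
      · rw [List.drop_eq_nil_of_le h]
        simp [PySem.List.enumerate, pvLoopA, pvScanB]

lemma loopA_eq_scanB (parts : List String) :
    pvLoopA parts (PySem.List.enumerate parts 0) = pvScanB parts := by
  cases parts with
  | nil => simp [PySem.List.enumerate, pvLoopA, pvScanB]
  | cons p rest =>
    rw [PySem.List.enumerate_cons, pvLoopA]
    rw [if_neg (by rintro ⟨-, h1, -⟩; omega)]
    have h := pvLoopA_drop (p :: rest) rest.length 1 (le_refl 1) (by simp)
    simpa using h

-- ---- char-level mirror of the triple scan ----
def pvScanC : List (List Char) → List Char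
  | a :: b :: c :: rest =>
    if a = ['2'] ∧ (b = ['e'] ∨ b = ['c'] ∨ b = ['j','s','o','n']) then c
    else pvScanC (b :: c :: rest)
  | _ => ['u','n','k','n','o','w','n']
termination_by l => l.length
decreasing_by simp

lemma toList_guard (a b : String) :
    (a = "2" ∧ (b = "e" ∨ b = "c" ∨ b = "json")) ↔
      (a.toList = ['2'] ∧ (b.toList = ['e'] ∨ b.toList = ['c'] ∨ b.toList = ['j','s','o','n'])) := by
  constructor
  · rintro ⟨rfl, rfl | rfl | rfl⟩ <;> simp
  · rintro ⟨h1, h2⟩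
    refine ⟨String.toList_inj.mp (by simpa using h1), ?_⟩
    rcases h2 with h | h | h
    · exact Or.inl (String.toList_inj.mp (by simpa using h))
    · exact Or.inr (Or.inl (String.toList_inj.mp (by simpa using h)))
    · exact Or.inr (Or.inr (String.toList_inj.mp (by simpa using h)))

lemma scanB_toList (parts : List String) :
    (pvScanB parts).toList = pvScanC (parts.map String.toList) := by
  fun_induction pvScanB parts with
  | case1 a b c rest hg =>
    rw [List.map_cons, List.map_cons, List.map_cons, pvScanC,
      if_pos ((toList_guard a b).mp hg)]
  | case2 a b c rest hg ih =>
    rw [List.map_cons, List.map_cons, List.map_cons, pvScanC,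
      if_neg (fun h => hg ((toList_guard a b).mpr h))]
    exact ih
  | case3 l h =>
    rcases l with _ | ⟨a, _ | ⟨b, _ | ⟨c, rest⟩⟩⟩
    · simp [pvScanC]
    · simp [pvScanC]
    · simp [pvScanC]
    · exact (h a b c rest rfl).elim

-- ---- Python's split("/") as a structural recursion ----
def pvSplit (cur : List Char) : List Char → List (List Char)
  | [] => [cur]
  | c :: rest => if c = '/' then cur :: pvSplit [] rest else pvSplit (cur ++ [c]) rest

lemma go_spec : ∀ fuel (l cur : List Char) acc, l.length < fuel →
    PySem.Chars.splitOn.go ['/'] fuel l cur acc = acc.reverse ++ pvSplit cur.reverse l := by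
  intro fuel
  induction fuel with
  | zero => intro l cur acc h; omega
  | succ fuel ih =>
    intro l cur acc h
    cases l with
    | nil => simp [PySem.Chars.splitOn.go, pvSplit]
    | cons c rest =>
      rw [PySem.Chars.splitOn.go]
      by_cases hc : c = '/'
      · rw [if_pos (by simp [List.isPrefixOf, hc])]
        simp only [List.length_singleton, List.drop_succ_cons, List.drop_zero]
        rw [ih rest [] (cur.reverse :: acc) (by simp at h ⊢; omega)]
        simp [pvSplit, hc]
      · rw [if_neg (by simp [List.isPrefixOf]; exact fun hcon => hc hcon.symm)]
        rw [ih rest (c :: cur) acc (by simp at h ⊢; omega)]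
        simp [pvSplit, hc]

lemma splitOn_eq_pvSplit (cs : List Char) :
    PySem.Chars.splitOn cs ['/'] = pvSplit [] cs := by
  rw [PySem.Chars.splitOn, go_spec _ _ _ _ (by omega)]
  simp

def pvGlue : List (List Char) → List Char
  | [] => []
  | [p] => p
  | p :: q :: ps => p ++ '/' :: pvGlue (q :: ps)

lemma pvGlue_cons {l : List (List Char)} (p : List Char) (h : l ≠ []) :
    pvGlue (p :: l) = p ++ '/' :: pvGlue l := by
  cases l with
  | nil => exact absurd rfl h
  | cons q ps => rfl

lemma pvSplit_ne_nil (cs : List Char) : ∀ cur, pvSplit cur cs ≠ [] := by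
  induction cs with
  | nil => intro cur; simp [pvSplit]
  | cons c rest ih =>
    intro cur
    rw [pvSplit]
    split_ifs
    · simp
    · exact ih _

lemma pvSplit_glue (cs : List Char) : ∀ cur, pvGlue (pvSplit cur cs) = cur ++ cs := by
  induction cs with
  | nil => intro cur; simp [pvSplit, pvGlue]
  | cons c rest ih =>
    intro cur
    rw [pvSplit]
    split_ifs with hc
    · rw [pvGlue_cons _ (pvSplit_ne_nil rest []), ih []]
      simp [hc]
    · rw [ih]
      simp

lemma pvSplit_noslash (cs : List Char) :
    ∀ cur, '/' ∉ cur → ∀ p ∈ pvSplit cur cs, '/' ∉ p := by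
  induction cs with
  | nil => intro cur hcur p hp; simp [pvSplit] at hp; exact hp ▸ hcur
  | cons c rest ih =>
    intro cur hcur p hp
    rw [pvSplit] at hp
    split_ifs at hp with hc
    · rcases List.mem_cons.mp hp with rfl | hp
      · exact hcur
      · exact ih [] (by simp) p hp
    · exact ih (cur ++ [c]) (by simp [hcur]; exact fun h => hc h.symm) p hp

-- ---- B-side char-level core ----
def pvSh (m : Nat) (j : Int) : Int := if j = -1 then -1 else m + j

def pvStepJ (j len : Int) (bp : Int × Int) : Int × Int :=
  if j ≠ -1 ∧ (bp.1 = -1 ∨ j < bp.1) then (j, len) else bp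

def pvPatE : List Char := ['/', '2', '/', 'e', '/']
def pvPatC : List Char := ['/', '2', '/', 'c', '/']
def pvPatJ : List Char := ['/', '2', '/', 'j', 's', 'o', 'n', '/']

def pvBest (s : List Char) : Int × Int :=
  pvStepJ (PySem.Chars.find s pvPatJ) 8
    (pvStepJ (PySem.Chars.find s pvPatC) 5
      (pvStepJ (PySem.Chars.find s pvPatE) 5 (-1, 0)))

def pvCore (s : List Char) : List Char :=
  let bp := pvBest s
  if bp.1 = -1 then ['u','n','k','n','o','w','n']
  else
    let rest := s.drop (bp.1 + bp.2).toNat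
    let k := PySem.Chars.find rest ['/']
    if k = -1 then rest else rest.take k.toNat

lemma stepJ_bound {j len : Int} {bp : Int × Int} (hj : -1 ≤ j) (hb : -1 ≤ bp.1) (hl : 0 ≤ len)
    (hb2 : 0 ≤ bp.2) : -1 ≤ (pvStepJ j len bp).1 ∧ 0 ≤ (pvStepJ j len bp).2 := by
  unfold pvStepJ; split_ifs <;> simp_all

lemma pvBest_bounds (s : List Char) : -1 ≤ (pvBest s).1 ∧ 0 ≤ (pvBest s).2 := by
  unfold pvBest
  have h1 := stepJ_bound (PySem.Chars.neg_one_le_find s pvPatE) (bp := (-1, 0)) (len := 5)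
    (by norm_num) (by norm_num) (by norm_num)
  have h2 := stepJ_bound (PySem.Chars.neg_one_le_find s pvPatC) h1.1 (len := 5) (by norm_num) h1.2
  exact stepJ_bound (PySem.Chars.neg_one_le_find s pvPatJ) h2.1 (len := 8) (by norm_num) h2.2

lemma toList_slash (topic : String) : ("/" ++ topic).toList = '/' :: topic.toList := by
  rw [String.toList_append]; rfl

lemma alt_toList (topic : String) :
    (extract_channel_from_topic_alt topic).toList = pvCore ('/' :: topic.toList) := by
  unfold extract_channel_from_topic_alt pvCore
  have hs : ("/" ++ topic).toList = '/' :: topic.toList := toList_slash topic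
  have he : ("/2/e/" : String).toList = pvPatE := by decide
  have hc : ("/2/c/" : String).toList = pvPatC := by decide
  have hj : ("/2/json/" : String).toList = pvPatJ := by decide
  have hfold : ["/2/e/", "/2/c/", "/2/json/"].foldl
      (fun (bp : Int × Int) (pat : String) =>
        let j := PySem.Str.find ("/" ++ topic) pat
        if j ≠ -1 ∧ (bp.1 = -1 ∨ j < bp.1) then (j, PySem.Str.len pat) else bp)
      (-1, 0) = pvBest ('/' :: topic.toList) := by
    simp only [List.foldl, PySem.Str.find_eq, PySem.Str.len_eq, hs, he, hc, hj, pvBest, pvStepJ]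
    norm_num [pvPatE, pvPatC, pvPatJ]
  simp only [hfold]
  by_cases h1 : (pvBest ('/' :: topic.toList)).1 = -1
  · simp only [h1, if_pos]
    decide
  · rw [if_neg h1, if_neg h1]
    have hb := pvBest_bounds ('/' :: topic.toList)
    have hnn : 0 ≤ (pvBest ('/' :: topic.toList)).1 + (pvBest ('/' :: topic.toList)).2 := by omega
    have hrest : (PySem.Str.slice ("/" ++ topic) (some ((pvBest ('/' :: topic.toList)).1 + (pvBest ('/' :: topic.toList)).2)) none).toList
        = ('/' :: topic.toList).drop ((pvBest ('/' :: topic.toList)).1 + (pvBest ('/' :: topic.toList)).2).toNat := by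
      rw [PySem.Str.toList_slice, PySem.Chars.slice_eq_listSlice, hs, PySem.List.slice_from _ hnn]
    have hfind : PySem.Str.find (PySem.Str.slice ("/" ++ topic) (some ((pvBest ('/' :: topic.toList)).1 + (pvBest ('/' :: topic.toList)).2)) none) "/"
        = PySem.Chars.find (('/' :: topic.toList).drop ((pvBest ('/' :: topic.toList)).1 + (pvBest ('/' :: topic.toList)).2).toNat) ['/'] := by
      rw [PySem.Str.find_eq, hrest]; rfl
    rw [hfind]
    by_cases hk : PySem.Chars.find (('/' :: topic.toList).drop ((pvBest ('/' :: topic.toList)).1 + (pvBest ('/' :: topic.toList)).2).toNat) ['/'] = -1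
    · rw [if_pos hk, if_pos hk, hrest]
    · rw [if_neg hk, if_neg hk]
      have hk0 : 0 ≤ PySem.Chars.find (('/' :: topic.toList).drop ((pvBest ('/' :: topic.toList)).1 + (pvBest ('/' :: topic.toList)).2).toNat) ['/'] := by
        have := PySem.Chars.neg_one_le_find (('/' :: topic.toList).drop ((pvBest ('/' :: topic.toList)).1 + (pvBest ('/' :: topic.toList)).2).toNat) ['/']
        omega
      rw [PySem.Str.toList_slice, PySem.Chars.slice_eq_listSlice, PySem.List.slice_to _ hk0, hrest]

-- ---- find characterisations ----
lemma find_eq_of {s pat : List Char} (n : Nat)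
    (h1 : pat <+: s.drop n) (h2 : ∀ i < n, ¬ pat <+: s.drop i) :
    PySem.Chars.find s pat = n := by
  have hinf : PySem.Chars.find s pat ≠ -1 := by
    rw [PySem.Chars.find_ne_neg_one_iff, ← PySem.Chars.isIn_iff_infix,
      ← PySem.Chars.exists_prefix_drop_iff_isIn]
    exact ⟨n, h1⟩
  have hge : 0 ≤ PySem.Chars.find s pat := by
    have := PySem.Chars.neg_one_le_find s pat; omega
  obtain ⟨hp, hmin⟩ := PySem.Chars.find_spec hge
  have : (PySem.Chars.find s pat).toNat = n := by
    rcases Nat.lt_trichotomy (PySem.Chars.find s pat).toNat n with h | h | h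
    · exact absurd hp (h2 _ h)
    · exact h
    · exact absurd h1 (hmin n h)
  omega

lemma find_shift {s pat : List Char} (m : Nat)
    (h2 : ∀ i < m, ¬ pat <+: s.drop i) :
    PySem.Chars.find s pat = pvSh m (PySem.Chars.find (s.drop m) pat) := by
  rcases eq_or_ne (PySem.Chars.find (s.drop m) pat) (-1) with h | h
  · rw [pvSh, if_pos h]
    rw [PySem.Chars.find_eq_neg_one_iff] at h ⊢
    intro hinf
    rw [← PySem.Chars.isIn_iff_infix, ← PySem.Chars.exists_prefix_drop_iff_isIn] at hinf
    obtain ⟨j, hj⟩ := hinf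
    rcases Nat.lt_or_ge j m with hjm | hjm
    · exact h2 j hjm hj
    · apply h
      rw [← PySem.Chars.isIn_iff_infix, ← PySem.Chars.exists_prefix_drop_iff_isIn]
      exact ⟨j - m, by rw [List.drop_drop, Nat.add_sub_cancel' hjm]; exact hj⟩
  · have hge : 0 ≤ PySem.Chars.find (s.drop m) pat := by
      have := PySem.Chars.neg_one_le_find (s.drop m) pat; omega
    obtain ⟨hp, hmin⟩ := PySem.Chars.find_spec hge
    rw [pvSh, if_neg h]
    have := find_eq_of (s := s) (pat := pat) (m + (PySem.Chars.find (s.drop m) pat).toNat)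
      (by rw [← List.drop_drop]; exact hp)
      (by
        intro i hi hpre
        rcases Nat.lt_or_ge i m with him | him
        · exact h2 i him hpre
        · refine hmin (i - m) (by omega) ?_
          rw [List.drop_drop, Nat.add_sub_cancel' him]
          exact hpre)
    rw [this]
    push_cast
    omega

lemma find_zero_of_prefix {s pat : List Char} (h : pat <+: s) :
    PySem.Chars.find s pat = 0 := by
  exact find_eq_of 0 (by simpa using h) (by omega)

lemma find_pos_of_ne {s pat : List Char} (hne : PySem.Chars.find s pat ≠ -1)
    (h : ¬ pat <+: s) : 0 < PySem.Chars.find s pat := by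
  have hge : 0 ≤ PySem.Chars.find s pat := by
    have := PySem.Chars.neg_one_le_find s pat; omega
  rcases hge.lt_or_eq with h' | h'
  · exact h'
  · obtain ⟨hp, -⟩ := PySem.Chars.find_spec hge
    rw [← h'] at hp
    simp at hp
    exact absurd hp h

lemma find_slash (r t : List Char) (hr : '/' ∉ r) :
    PySem.Chars.find (r ++ '/' :: t) ['/'] = r.length := by
  apply find_eq_of
  · rw [List.drop_left]
    exact ⟨t, rfl⟩
  · intro i hi hpre
    rw [List.drop_append_of_le_length (by omega), List.drop_eq_getElem_cons hi] at hpre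
    obtain ⟨heq, -⟩ := List.cons_prefix_cons.mp hpre
    exact hr (heq ▸ List.getElem_mem _)

lemma find_slash_none (r : List Char) (hr : '/' ∉ r) :
    PySem.Chars.find r ['/'] = -1 := by
  rw [PySem.Chars.find_eq_neg_one_iff]
  intro h
  exact hr (List.singleton_sublist.mp h.sublist)

-- ---- pattern position analysis ----
lemma no_match_mid {p t pat : List Char} (hp : '/' ∉ p)
    (hpat : pat = pvPatE ∨ pat = pvPatC ∨ pat = pvPatJ)
    {i : Nat} (h1 : 1 ≤ i) (h2 : i ≤ p.length) :
    ¬ pat <+: ('/' :: (p ++ t)).drop i := by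
  intro hpre
  rw [show i = (i - 1) + 1 by omega, List.drop_succ_cons,
    List.drop_append_of_le_length (by omega),
    List.drop_eq_getElem_cons (by omega)] at hpre
  have hmem : p[i-1]'(by omega) ∈ p := List.getElem_mem _
  rcases hpat with rfl | rfl | rfl <;>
    · obtain ⟨heq, -⟩ := List.cons_prefix_cons.mp hpre
      rw [← heq] at hmem
      exact hp hmem

lemma seg_eq (ind : List Char) : ∀ q g, '/' ∉ ind → '/' ∉ q →
    ind ++ ['/'] <+: q ++ '/' :: g → q = ind := by
  induction ind with
  | nil =>
    intro q g _ hq h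
    cases q with
    | nil => rfl
    | cons c q' =>
      have h' : ('/' : Char) :: [] <+: c :: (q' ++ '/' :: g) := by simpa using h
      obtain ⟨heq, -⟩ := List.cons_prefix_cons.mp h'
      exact absurd (by rw [← heq]; exact List.mem_cons_self) hq
  | cons a ind' ih =>
    intro q g hind hq h
    cases q with
    | nil =>
      have h' : a :: (ind' ++ ['/']) <+: '/' :: g := by simpa using h
      obtain ⟨heq, -⟩ := List.cons_prefix_cons.mp h'
      exact absurd (by rw [heq]; exact List.mem_cons_self) hind
    | cons c q' =>
      have h' : a :: (ind' ++ ['/']) <+: c :: (q' ++ '/' :: g) := by simpa using h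
      obtain ⟨heq, htail⟩ := List.cons_prefix_cons.mp h'
      rw [ih q' g (fun hm => hind (List.mem_cons_of_mem _ hm))
        (fun hm => hq (List.mem_cons_of_mem _ hm)) htail, heq]

lemma match0_aux {p : List Char} {ps' : List (List Char)} {u : List Char} (hp : '/' ∉ p)
    (h : '2' :: '/' :: u <+: pvGlue (p :: ps')) :
    p = ['2'] ∧ ps' ≠ [] ∧ u <+: pvGlue ps' := by
  cases ps' with
  | nil =>
    have hmem : '/' ∈ p := h.sublist.mem (by simp)
    exact absurd hmem hp
  | cons q qs =>
    have h' : '2' :: '/' :: u <+: p ++ '/' :: pvGlue (q :: qs) := h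
    cases p with
    | nil =>
      simp at h'
    | cons c p' =>
      have h'' : '2' :: '/' :: u <+: c :: (p' ++ '/' :: pvGlue (q :: qs)) := by simpa using h'
      obtain ⟨heq, htail⟩ := List.cons_prefix_cons.mp h''
      cases p' with
      | nil =>
        have htail2 : u <+: pvGlue (q :: qs) := by simpa using htail
        exact ⟨by rw [heq], by simp, htail2⟩
      | cons d p'' =>
        have h3 : '/' = d ∧ u <+: p'' ++ '/' :: pvGlue (q :: qs) := by simpa using htail
        exact absurd (by rw [h3.1]; exact List.mem_cons_of_mem _ List.mem_cons_self) hp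

-- match at position 0 forces the guard
lemma match0 {p : List Char} {ps' : List (List Char)} {pat : List Char}
    (hpat : pat = pvPatE ∨ pat = pvPatC ∨ pat = pvPatJ)
    (hp : '/' ∉ p) (hps : ∀ q ∈ ps', '/' ∉ q)
    (h : pat <+: '/' :: pvGlue (p :: ps')) :
    p = ['2'] ∧ ∃ q r rs, ps' = q :: r :: rs ∧
      (q = ['e'] ∧ pat = pvPatE ∨ q = ['c'] ∧ pat = pvPatC ∨ q = ['j','s','o','n'] ∧ pat = pvPatJ) := by
  have key : ∀ ind : List Char, '/' ∉ ind →
      ('2' :: '/' :: (ind ++ ['/'])) <+: pvGlue (p :: ps') →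
      p = ['2'] ∧ ∃ r rs, ps' = ind :: r :: rs := by
    intro ind hind h2
    obtain ⟨hp2, hne, hu⟩ := match0_aux hp h2
    refine ⟨hp2, ?_⟩
    cases ps' with
    | nil => exact absurd rfl hne
    | cons q qs =>
      cases qs with
      | nil =>
        have hmem : '/' ∈ q := hu.sublist.mem (by simp)
        exact absurd hmem (hps q List.mem_cons_self)
      | cons r rs =>
        have hq : q = ind := seg_eq ind q _ hind (hps q List.mem_cons_self) hu
        exact ⟨r, rs, by rw [hq]⟩
  rcases hpat with rfl | rfl | rfl
  · obtain ⟨h1, r, rs, h3⟩ := key ['e'] (by decide) (by simpa [pvPatE] using h)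
    exact ⟨h1, ['e'], r, rs, h3, Or.inl ⟨rfl, rfl⟩⟩
  · obtain ⟨h1, r, rs, h3⟩ := key ['c'] (by decide) (by simpa [pvPatC] using h)
    exact ⟨h1, ['c'], r, rs, h3, Or.inr (Or.inl ⟨rfl, rfl⟩)⟩
  · obtain ⟨h1, r, rs, h3⟩ := key ['j','s','o','n'] (by decide) (by simpa [pvPatJ] using h)
    exact ⟨h1, ['j','s','o','n'], r, rs, h3, Or.inr (Or.inr ⟨rfl, rfl⟩)⟩

lemma no_two_pats {t p1 p2 : List Char}
    (h1 : p1 = pvPatE ∨ p1 = pvPatC ∨ p1 = pvPatJ)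
    (h2 : p2 = pvPatE ∨ p2 = pvPatC ∨ p2 = pvPatJ)
    (hne : p1 ≠ p2) : ¬ (p1 <+: t ∧ p2 <+: t) := by
  rintro ⟨ha, hb⟩
  have := List.prefix_or_prefix_of_prefix ha hb
  rcases h1 with rfl | rfl | rfl <;> rcases h2 with rfl | rfl | rfl <;>
    first
      | exact hne rfl
      | (rcases this with h | h <;> revert h <;> decide)

lemma best_sh (m : Nat) (jE jC jJ : Int) (hE : -1 ≤ jE) (hC : -1 ≤ jC) (hJ : -1 ≤ jJ) :
    pvStepJ (pvSh m jJ) 8 (pvStepJ (pvSh m jC) 5 (pvStepJ (pvSh m jE) 5 (-1, 0))) =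
      (pvSh m (pvStepJ jJ 8 (pvStepJ jC 5 (pvStepJ jE 5 (-1, 0)))).1,
       (pvStepJ jJ 8 (pvStepJ jC 5 (pvStepJ jE 5 (-1, 0)))).2) := by
  unfold pvStepJ pvSh
  by_cases h1 : jE = -1 <;> by_cases h2 : jC = -1 <;> by_cases h3 : jJ = -1 <;>
    simp only [h1, h2, h3, reduceIte, ne_eq, not_true_eq_false, not_false_eq_true,
      false_and, true_and] <;>
    split_ifs <;>
    first | constructor <;> omega | rfl | omega | (exfalso; omega) | simp_all <;> omega

-- after the hit, the next segment is sliced out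
lemma core_tail (r : List Char) (rs : List (List Char)) (hr : '/' ∉ r) (k : Int)
    (hk : k = PySem.Chars.find (pvGlue (r :: rs)) ['/']) :
    (if k = -1 then pvGlue (r :: rs) else (pvGlue (r :: rs)).take k.toNat) = r := by
  cases rs with
  | nil =>
    rw [if_pos (by rw [hk]; exact find_slash_none r hr)]
    rfl
  | cons r2 rs' =>
    have hg : pvGlue (r :: r2 :: rs') = r ++ '/' :: pvGlue (r2 :: rs') := rfl
    have hfind : k = (r.length : Int) := by rw [hk, hg]; exact find_slash r _ hr
    rw [if_neg (by omega), hfind]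
    simp [hg]

-- a hit at position 0: the best pair is (0, pattern length) and pvCore returns the next segment
lemma core_hit (ind r : List Char) (rs : List (List Char)) (hr : '/' ∉ r)
    (hind : ind = ['e'] ∨ ind = ['c'] ∨ ind = ['j','s','o','n']) :
    pvCore ('/' :: pvGlue (['2'] :: ind :: r :: rs)) = r := by
  have hglue : '/' :: pvGlue (['2'] :: ind :: r :: rs) =
      ('/' :: '2' :: '/' :: (ind ++ ['/'])) ++ pvGlue (r :: rs) := by
    rw [pvGlue_cons _ (by simp), pvGlue_cons _ (by simp)]
    simp
  rcases hind with rfl | rfl | rfl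
  · -- ind = e, pattern pvPatE
    have hglue' : '/' :: pvGlue (['2'] :: ['e'] :: r :: rs) = pvPatE ++ pvGlue (r :: rs) := by
      rw [hglue]; rfl
    have hpre : pvPatE <+: '/' :: pvGlue (['2'] :: ['e'] :: r :: rs) :=
      ⟨pvGlue (r :: rs), hglue'.symm⟩
    have h0 : PySem.Chars.find ('/' :: pvGlue (['2'] :: ['e'] :: r :: rs)) pvPatE = 0 :=
      find_zero_of_prefix hpre
    have hC : PySem.Chars.find ('/' :: pvGlue (['2'] :: ['e'] :: r :: rs)) pvPatC = -1 ∨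
        0 < PySem.Chars.find ('/' :: pvGlue (['2'] :: ['e'] :: r :: rs)) pvPatC := by
      by_cases hne : PySem.Chars.find ('/' :: pvGlue (['2'] :: ['e'] :: r :: rs)) pvPatC = -1
      · exact Or.inl hne
      · exact Or.inr (find_pos_of_ne hne (fun hpre1 =>
          no_two_pats (Or.inr (Or.inl rfl)) (Or.inl rfl) (by decide) ⟨hpre1, hpre⟩))
    have hJ : PySem.Chars.find ('/' :: pvGlue (['2'] :: ['e'] :: r :: rs)) pvPatJ = -1 ∨
        0 < PySem.Chars.find ('/' :: pvGlue (['2'] :: ['e'] :: r :: rs)) pvPatJ := by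
      by_cases hne : PySem.Chars.find ('/' :: pvGlue (['2'] :: ['e'] :: r :: rs)) pvPatJ = -1
      · exact Or.inl hne
      · exact Or.inr (find_pos_of_ne hne (fun hpre1 =>
          no_two_pats (Or.inr (Or.inr rfl)) (Or.inl rfl) (by decide) ⟨hpre1, hpre⟩))
    have hbest : pvBest ('/' :: pvGlue (['2'] :: ['e'] :: r :: rs)) = (0, 5) := by
      unfold pvBest
      rw [h0]
      have s1 : pvStepJ 0 5 (-1, 0) = (0, 5) := by norm_num [pvStepJ]
      rw [s1]
      have s2 : pvStepJ (PySem.Chars.find ('/' :: pvGlue (['2'] :: ['e'] :: r :: rs)) pvPatC) 5 (0, 5) = (0, 5) := by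
        rcases hC with h | h
        · simp [pvStepJ, h]
        · rw [pvStepJ, if_neg (by simp; omega)]
      rw [s2]
      rcases hJ with h | h
      · simp [pvStepJ, h]
      · rw [pvStepJ, if_neg (by simp; omega)]
    unfold pvCore
    rw [hbest]
    norm_num
    rw [hglue', show ((5 : Int)).toNat = pvPatE.length from rfl, List.drop_left]
    exact core_tail r rs hr _ rfl
  · -- ind = c, pattern pvPatC
    have hglue' : '/' :: pvGlue (['2'] :: ['c'] :: r :: rs) = pvPatC ++ pvGlue (r :: rs) := by
      rw [hglue]; rfl
    have hpre : pvPatC <+: '/' :: pvGlue (['2'] :: ['c'] :: r :: rs) :=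
      ⟨pvGlue (r :: rs), hglue'.symm⟩
    have h0 : PySem.Chars.find ('/' :: pvGlue (['2'] :: ['c'] :: r :: rs)) pvPatC = 0 :=
      find_zero_of_prefix hpre
    have hE : PySem.Chars.find ('/' :: pvGlue (['2'] :: ['c'] :: r :: rs)) pvPatE = -1 ∨
        0 < PySem.Chars.find ('/' :: pvGlue (['2'] :: ['c'] :: r :: rs)) pvPatE := by
      by_cases hne : PySem.Chars.find ('/' :: pvGlue (['2'] :: ['c'] :: r :: rs)) pvPatE = -1
      · exact Or.inl hne
      · exact Or.inr (find_pos_of_ne hne (fun hpre1 =>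
          no_two_pats (Or.inl rfl) (Or.inr (Or.inl rfl)) (by decide) ⟨hpre1, hpre⟩))
    have hJ : PySem.Chars.find ('/' :: pvGlue (['2'] :: ['c'] :: r :: rs)) pvPatJ = -1 ∨
        0 < PySem.Chars.find ('/' :: pvGlue (['2'] :: ['c'] :: r :: rs)) pvPatJ := by
      by_cases hne : PySem.Chars.find ('/' :: pvGlue (['2'] :: ['c'] :: r :: rs)) pvPatJ = -1
      · exact Or.inl hne
      · exact Or.inr (find_pos_of_ne hne (fun hpre1 =>
          no_two_pats (Or.inr (Or.inr rfl)) (Or.inr (Or.inl rfl)) (by decide) ⟨hpre1, hpre⟩))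
    have hbest : pvBest ('/' :: pvGlue (['2'] :: ['c'] :: r :: rs)) = (0, 5) := by
      unfold pvBest
      rw [h0]
      have s1 : pvStepJ (PySem.Chars.find ('/' :: pvGlue (['2'] :: ['c'] :: r :: rs)) pvPatE) 5 (-1, 0) =
          (PySem.Chars.find ('/' :: pvGlue (['2'] :: ['c'] :: r :: rs)) pvPatE, 5) ∨
          pvStepJ (PySem.Chars.find ('/' :: pvGlue (['2'] :: ['c'] :: r :: rs)) pvPatE) 5 (-1, 0) = (-1, 0) := by
        unfold pvStepJ; split_ifs <;> simp
      have s2 : pvStepJ 0 5 (pvStepJ (PySem.Chars.find ('/' :: pvGlue (['2'] :: ['c'] :: r :: rs)) pvPatE) 5 (-1, 0)) = (0, 5) := by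
        rcases s1 with h | h <;> rw [h]
        · rcases hE with h' | h'
          · rw [h']; norm_num [pvStepJ]
          · rw [pvStepJ, if_pos ⟨by omega, Or.inr (by simpa using h')⟩]
        · norm_num [pvStepJ]
      rw [s2]
      rcases hJ with h | h
      · simp [pvStepJ, h]
      · rw [pvStepJ, if_neg (by simp; omega)]
    unfold pvCore
    rw [hbest]
    norm_num
    rw [hglue', show ((5 : Int)).toNat = pvPatC.length from rfl, List.drop_left]
    exact core_tail r rs hr _ rfl
  · -- ind = json, pattern pvPatJ
    have hglue' : '/' :: pvGlue (['2'] :: ['j','s','o','n'] :: r :: rs) = pvPatJ ++ pvGlue (r :: rs) := by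
      rw [hglue]; rfl
    have hpre : pvPatJ <+: '/' :: pvGlue (['2'] :: ['j','s','o','n'] :: r :: rs) :=
      ⟨pvGlue (r :: rs), hglue'.symm⟩
    have h0 : PySem.Chars.find ('/' :: pvGlue (['2'] :: ['j','s','o','n'] :: r :: rs)) pvPatJ = 0 :=
      find_zero_of_prefix hpre
    have hE : PySem.Chars.find ('/' :: pvGlue (['2'] :: ['j','s','o','n'] :: r :: rs)) pvPatE = -1 ∨
        0 < PySem.Chars.find ('/' :: pvGlue (['2'] :: ['j','s','o','n'] :: r :: rs)) pvPatE := by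
      by_cases hne : PySem.Chars.find ('/' :: pvGlue (['2'] :: ['j','s','o','n'] :: r :: rs)) pvPatE = -1
      · exact Or.inl hne
      · exact Or.inr (find_pos_of_ne hne (fun hpre1 =>
          no_two_pats (Or.inl rfl) (Or.inr (Or.inr rfl)) (by decide) ⟨hpre1, hpre⟩))
    have hC : PySem.Chars.find ('/' :: pvGlue (['2'] :: ['j','s','o','n'] :: r :: rs)) pvPatC = -1 ∨
        0 < PySem.Chars.find ('/' :: pvGlue (['2'] :: ['j','s','o','n'] :: r :: rs)) pvPatC := by
      by_cases hne : PySem.Chars.find ('/' :: pvGlue (['2'] :: ['j','s','o','n'] :: r :: rs)) pvPatC = -1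
      · exact Or.inl hne
      · exact Or.inr (find_pos_of_ne hne (fun hpre1 =>
          no_two_pats (Or.inr (Or.inl rfl)) (Or.inr (Or.inr rfl)) (by decide) ⟨hpre1, hpre⟩))
    have hbest : pvBest ('/' :: pvGlue (['2'] :: ['j','s','o','n'] :: r :: rs)) = (0, 8) := by
      unfold pvBest
      rw [h0]
      have s1 : (pvStepJ (PySem.Chars.find ('/' :: pvGlue (['2'] :: ['j','s','o','n'] :: r :: rs)) pvPatC) 5
          (pvStepJ (PySem.Chars.find ('/' :: pvGlue (['2'] :: ['j','s','o','n'] :: r :: rs)) pvPatE) 5 (-1, 0))).1 = -1 ∨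
          0 < (pvStepJ (PySem.Chars.find ('/' :: pvGlue (['2'] :: ['j','s','o','n'] :: r :: rs)) pvPatC) 5
          (pvStepJ (PySem.Chars.find ('/' :: pvGlue (['2'] :: ['j','s','o','n'] :: r :: rs)) pvPatE) 5 (-1, 0))).1 := by
        unfold pvStepJ
        split_ifs <;> simp_all <;> omega
      rw [pvStepJ, if_pos ⟨by omega, s1⟩]
    unfold pvCore
    rw [hbest]
    norm_num
    rw [hglue', show ((8 : Int)).toNat = pvPatJ.length from rfl, List.drop_left]
    exact core_tail r rs hr _ rfl

-- ---- the main induction ----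
lemma core_glue : ∀ ps : List (List Char), ps ≠ [] → (∀ p ∈ ps, '/' ∉ p) →
    pvCore ('/' :: pvGlue ps) = pvScanC ps := by
  intro ps
  induction ps with
  | nil => intro h; exact absurd rfl h
  | cons p ps' ih =>
    intro _ hns
    have hp : '/' ∉ p := hns p List.mem_cons_self
    cases ps' with
    | nil =>
      have hno : ∀ pat, pat = pvPatE ∨ pat = pvPatC ∨ pat = pvPatJ →
          PySem.Chars.find ('/' :: pvGlue [p]) pat = -1 := by
        intro pat hpat
        rw [PySem.Chars.find_eq_neg_one_iff]
        intro hinf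
        rw [← PySem.Chars.isIn_iff_infix, ← PySem.Chars.exists_prefix_drop_iff_isIn] at hinf
        obtain ⟨j, hj⟩ := hinf
        rcases Nat.eq_zero_or_pos j with rfl | hj1
        · obtain ⟨-, q, r, rs, hqq, -⟩ := match0 hpat hp (fun q hq => absurd hq List.not_mem_nil) hj
          exact (List.cons_ne_nil q (r :: rs) hqq.symm).elim
        · rcases Nat.lt_or_ge j (p.length + 1) with hj2 | hj2
          · exact no_match_mid (t := []) hp hpat hj1 (by omega) (by simpa using hj)
          · rw [List.drop_eq_nil_of_le (by simp [pvGlue]; omega)] at hj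
            rcases hpat with rfl | rfl | rfl <;> simp [pvPatE, pvPatC, pvPatJ] at hj
      have h1 := hno pvPatE (Or.inl rfl)
      have h2 := hno pvPatC (Or.inr (Or.inl rfl))
      have h3 := hno pvPatJ (Or.inr (Or.inr rfl))
      unfold pvCore pvBest
      rw [h1, h2, h3]
      simp [pvStepJ, pvScanC]
    | cons q qs =>
      have hq : '/' ∉ q := hns q (List.mem_cons_of_mem _ List.mem_cons_self)
      have hns' : ∀ r ∈ q :: qs, '/' ∉ r := fun r hr => hns r (List.mem_cons_of_mem _ hr)
      by_cases hg : p = ['2'] ∧ (q = ['e'] ∨ q = ['c'] ∨ q = ['j','s','o','n']) ∧ qs ≠ []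
      · obtain ⟨rfl, hqi, hqs⟩ := hg
        obtain ⟨r, rs, rfl⟩ : ∃ r rs, qs = r :: rs := by
          cases qs with
          | nil => exact absurd rfl hqs
          | cons r rs => exact ⟨r, rs, rfl⟩
        rw [core_hit q r rs (hns' r (List.mem_cons_of_mem _ List.mem_cons_self)) hqi]
        rw [pvScanC, if_pos ⟨rfl, hqi⟩]
      · -- guard fails: shift everything past the first segment
        have hsplit : '/' :: pvGlue (p :: q :: qs) = ('/' :: p) ++ ('/' :: pvGlue (q :: qs)) := by
          rw [pvGlue_cons p (by simp)]
          simp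
        have hnomid : ∀ pat, pat = pvPatE ∨ pat = pvPatC ∨ pat = pvPatJ →
            ∀ i < p.length + 1, ¬ pat <+: ('/' :: pvGlue (p :: q :: qs)).drop i := by
          intro pat hpat i hi hpre
          rcases Nat.eq_zero_or_pos i with rfl | hi1
          · obtain ⟨hp2, q', r, rs, heq, hor⟩ := match0 hpat hp hns' (by simpa using hpre)
            obtain ⟨heq1, heq2⟩ := List.cons_eq_cons.mp heq
            subst heq1 heq2
            exact hg ⟨hp2, by rcases hor with ⟨h,-⟩ | ⟨h,-⟩ | ⟨h,-⟩; exacts [Or.inl h, Or.inr (Or.inl h), Or.inr (Or.inr h)], by simp⟩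
          · rw [hsplit] at hpre
            exact no_match_mid (t := '/' :: pvGlue (q :: qs)) hp hpat hi1 (by omega)
              (by simpa using hpre)
        have hdropm : ('/' :: pvGlue (p :: q :: qs)).drop (p.length + 1) = '/' :: pvGlue (q :: qs) := by
          rw [hsplit]
          exact List.drop_left' (by simp)
        have hE := find_shift (s := '/' :: pvGlue (p :: q :: qs)) (pat := pvPatE) (p.length + 1)
          (fun i hi => hnomid pvPatE (Or.inl rfl) i hi)
        have hC := find_shift (s := '/' :: pvGlue (p :: q :: qs)) (pat := pvPatC) (p.length + 1)
          (fun i hi => hnomid pvPatC (Or.inr (Or.inl rfl)) i hi)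
        have hJ := find_shift (s := '/' :: pvGlue (p :: q :: qs)) (pat := pvPatJ) (p.length + 1)
          (fun i hi => hnomid pvPatJ (Or.inr (Or.inr rfl)) i hi)
        rw [hdropm] at hE hC hJ
        have hbest : pvBest ('/' :: pvGlue (p :: q :: qs)) =
            (pvSh (p.length + 1) (pvBest ('/' :: pvGlue (q :: qs))).1,
             (pvBest ('/' :: pvGlue (q :: qs))).2) := by
          unfold pvBest
          rw [hE, hC, hJ]
          exact best_sh (p.length + 1) _ _ _ (PySem.Chars.neg_one_le_find _ _)
            (PySem.Chars.neg_one_le_find _ _) (PySem.Chars.neg_one_le_find _ _)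
        have hscan : pvScanC (p :: q :: qs) = pvScanC (q :: qs) := by
          cases qs with
          | nil => simp [pvScanC]
          | cons r rs =>
            rw [pvScanC, if_neg (fun hcon => hg ⟨hcon.1, hcon.2, by simp⟩)]
        rw [hscan, ← ih (by simp) hns']
        obtain ⟨hbb1, hbb2⟩ := pvBest_bounds ('/' :: pvGlue (q :: qs))
        unfold pvCore
        rw [hbest]
        dsimp only
        by_cases hb1 : (pvBest ('/' :: pvGlue (q :: qs))).1 = -1
        · rw [hb1]
          norm_num [pvSh]
        · rw [if_neg (by simp [pvSh, hb1]; omega), if_neg hb1]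
          have hdrop2 : ('/' :: pvGlue (p :: q :: qs)).drop
              ((pvSh (p.length + 1) (pvBest ('/' :: pvGlue (q :: qs))).1 +
                (pvBest ('/' :: pvGlue (q :: qs))).2).toNat) =
              ('/' :: pvGlue (q :: qs)).drop
              (((pvBest ('/' :: pvGlue (q :: qs))).1 + (pvBest ('/' :: pvGlue (q :: qs))).2).toNat) := by
            have harith : (pvSh (p.length + 1) (pvBest ('/' :: pvGlue (q :: qs))).1 +
                (pvBest ('/' :: pvGlue (q :: qs))).2).toNat =
                (p.length + 1) + ((pvBest ('/' :: pvGlue (q :: qs))).1 +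
                  (pvBest ('/' :: pvGlue (q :: qs))).2).toNat := by
              simp [pvSh, hb1]
              omega
            rw [harith, ← List.drop_drop, hdropm]
          rw [hdrop2]

-- ===== VERDICT (by name: the statement is the Claim_ definition above) =====
theorem extract_channel_from_topic_spec : Claim_equal_extract_channel_from_topic := by
  intro topic _
  unfold Spec_extract_channel_from_topic
  apply String.toList_inj.mp
  unfold extract_channel_from_topic
  obtain ⟨parts, hparts⟩ : ∃ l, PySem.Str.split? topic "/" = some l := by
    have h := PySem.Str.split?_map topic "/"
    cases hsp : PySem.Str.split? topic "/" with
    | none => rw [hsp] at h; simp [PySem.Chars.split?] at h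
    | some l => exact ⟨l, rfl⟩
  have hmap : parts.map String.toList = pvSplit [] topic.toList := by
    have h := PySem.Str.split?_map topic "/"
    rw [hparts] at h
    simp only [Option.map_some] at h
    rw [show ("/" : String).toList = ['/'] from rfl] at h
    rw [show PySem.Chars.split? topic.toList ['/'] =
        some (PySem.Chars.splitOn topic.toList ['/']) by simp [PySem.Chars.split?]] at h
    rw [Option.some_inj.mp h, splitOn_eq_pvSplit]
  rw [hparts]
  simp only [Option.getD_some]
  rw [loopA_eq_scanB, scanB_toList, hmap, alt_toList]
  have hcg := core_glue (pvSplit [] topic.toList) (pvSplit_ne_nil topic.toList [])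
    (pvSplit_noslash topic.toList [] (by simp))
  rw [pvSplit_glue topic.toList []] at hcg
  simpa using hcg.symm
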